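-- pv_equiv track=rewrite | github.com/tomduck/bassclef | scripts/preprocess.py | insert_figure
-- ===== SOURCE A (Python) =====
-- def insert_figure(lines, image, caption):
--     """Inserts a figure into the markdown lines."""
--
--     # Look for the image line
--     n = None
--     flag = False  # Flag when we have found it
--     for i, line in enumerate(lines):
--         if flag:
--             n = i
--             break
--         if line == '<!-- image -->':
--             n = i
--             continue
--
--     # Look for the break line
--     if n is None:
--         flag = False  # Flag when we have found it
--         for i, line in enumerate(lines):
--             if flag:
--                 n = i
--                 break
--             if line == '<!-- break -->':
--                 n = i
--                 continue
--
--     # Find the end of the first paragraph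
--     if n is None:
--         flag = False  # Flag when we have found it
--         for i, line in enumerate(lines):
--             if flag:
--                 n = i
--                 break
--             if line:
--                 flag = True
--                 continue
--
--     # Insert the lines for the figure
--     n = n if n is not None else len(lines)
--     lines.insert(n, '\n![%s](%s)\n' % (caption, image))
--     lines.insert(n, '')
--
--     return lines
-- ===== SOURCE B (Python) =====
-- def insert_figure(lines, image, caption):
--     """Inserts a figure into the markdown lines."""
--     # One backward pass with a priority rank (2 = image marker, 1 = break marker,
--     # 0 = paragraph fallback): the first marker met from the right is the last
--     # occurrence, and a higher-priority marker further left overrides a lower one.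
--     rank, cut = 0, len(lines)
--     for k, h in reversed(list(enumerate(lines))):
--         if h == '<!-- image -->' and rank < 2:
--             rank, cut = 2, k
--         elif h == '<!-- break -->' and rank == 0:
--             rank, cut = 1, k
--         elif h and rank == 0:
--             cut = k + 1
--     lines[cut:cut] = ['', '\n![%s](%s)\n' % (caption, image)]
--     return lines
-- ===== Notes on version B (the rewrite author's own statement) =====
-- stated objective: alternative
-- what changed: Replaces A's three staged forward flag-loops (marker scan, break scan, paragraph scan) by a single backward pass carrying a priority rank that picks the insertion point (last image marker > last break marker > one past the first non-empty line > end), followed by one slice-assignment splice instead of two inserts.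
import Mathlib
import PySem

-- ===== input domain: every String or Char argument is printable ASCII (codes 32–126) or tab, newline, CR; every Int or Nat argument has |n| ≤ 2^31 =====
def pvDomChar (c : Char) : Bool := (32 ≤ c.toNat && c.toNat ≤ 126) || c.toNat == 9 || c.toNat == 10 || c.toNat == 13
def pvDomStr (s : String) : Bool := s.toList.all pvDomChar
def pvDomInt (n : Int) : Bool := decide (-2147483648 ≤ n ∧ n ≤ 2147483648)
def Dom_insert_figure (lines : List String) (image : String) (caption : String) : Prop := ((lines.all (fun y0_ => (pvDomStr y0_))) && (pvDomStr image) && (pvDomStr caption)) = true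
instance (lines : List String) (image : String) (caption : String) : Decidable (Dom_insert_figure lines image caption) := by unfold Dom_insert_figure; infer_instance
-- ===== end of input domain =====

-- B replaces A's three staged forward flag-loops by ONE backward pass carrying a
-- priority rank, then a single splice (objective: alternative decomposition).
-- Python A mutates `lines` in place; the equivalence proved is about the return
-- value (B performs the same in-place splice in Python).

-- ===== PORT A =====
-- 'for i, line in enumerate(lines)' with state (n, flag) and break; the Nat counter i
-- transcribes enumerate's index.
def loopMarkerA : List String → String → Nat → Option Nat → Bool → Option Nat
  | [], _, _, n, _ => n
  | line :: rest, m, i, n, flag =>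
    if flag then some i                       -- if flag: n = i; break
    else if line == m then loopMarkerA rest m (i+1) (some i) flag   -- n = i; continue
    else loopMarkerA rest m (i+1) n flag

def loopParaA : List String → Nat → Option Nat → Bool → Option Nat
  | [], _, n, _ => n
  | line :: rest, i, n, flag =>
    if flag then some i                       -- if flag: n = i; break
    else if line ≠ "" then loopParaA rest (i+1) n true   -- if line: flag = True; continue
    else loopParaA rest (i+1) n flag

def insert_figure (lines : List String) (image : String) (caption : String) : List String :=
  let n1 := loopMarkerA lines "<!-- image -->" 0 none false
  let n2 := if n1 = none then loopMarkerA lines "<!-- break -->" 0 none false else n1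
  let n3 := if n2 = none then loopParaA lines 0 none false else n2
  let n : Nat := n3.getD lines.length        -- n = n if n is not None else len(lines)
  let fig := "\n![" ++ caption ++ "](" ++ image ++ ")\n"
  -- lines.insert(n, fig); lines.insert(n, '')
  PySem.List.insert (PySem.List.insert lines (n : Int) fig) (n : Int) ""

-- ===== PORT B =====
-- 'for k, h in reversed(list(enumerate(lines)))' with state (rank, cut)
def loopB : List (Int × String) → Int × Int → Int × Int
  | [], s => s
  | (k, h) :: rest, (rank, cut) =>
    loopB rest
      (if h = "<!-- image -->" ∧ rank < 2 then (2, k)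
       else if h = "<!-- break -->" ∧ rank = 0 then (1, k)
       else if h ≠ "" ∧ rank = 0 then (rank, k + 1)
       else (rank, cut))

def insert_figure_alt (lines : List String) (image : String) (caption : String) : List String :=
  let s := loopB (PySem.List.enumerate lines).reverse (0, (lines.length : Int))
  -- lines[cut:cut] = ['', fig]; cut is always an index in [0, len(lines)] (see
  -- loopB_char below), so take/drop at cut.toNat is the exact slice assignment
  lines.take s.2.toNat ++ "" :: ("\n![" ++ caption ++ "](" ++ image ++ ")\n") :: lines.drop s.2.toNat

-- ===== PRECONDITION & SPEC =====
def Spec_insert_figure (lines : List String) (image : String) (caption : String) (out : List String) : Prop := out = insert_figure_alt lines image caption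
instance (lines : List String) (image : String) (caption : String) (out : List String) : Decidable (Spec_insert_figure lines image caption out) := by unfold Spec_insert_figure; infer_instance

-- ===== CLAIM (what is proved, stated in full; the proofs are below) =====
def Claim_equal_insert_figure : Prop := ∀ (lines : List String) (image : String) (caption : String), Dom_insert_figure lines image caption → Spec_insert_figure lines image caption (insert_figure lines image caption)

-- ===== LEMMAS AND PROOFS =====

-- index (from the left) of the LAST occurrence of m, m ∈ xs assumed where used
def lastIdx (xs : List String) (m : String) : Nat :=
  xs.length - 1 - (PySem.List.index? xs.reverse m).getD 0

theorem lastIdx_append_self (xs : List String) (m : String) :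
    lastIdx (xs ++ [m]) m = xs.length := by
  unfold lastIdx
  have hr : (xs ++ [m]).reverse = m :: xs.reverse := by simp
  rw [hr, PySem.List.index?_cons_self]
  simp

theorem lastIdx_append_ne (xs : List String) (a m : String) (hne : a ≠ m) (hm : m ∈ xs) :
    lastIdx (xs ++ [a]) m = lastIdx xs m := by
  unfold lastIdx
  have hrev : PySem.List.index? (xs ++ [a]).reverse m
      = (PySem.List.index? xs.reverse m).map (· + 1) := by
    have hr : (xs ++ [a]).reverse = a :: xs.reverse := by simp
    rw [hr]
    exact PySem.List.index?_cons_of_ne xs.reverse hne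
  obtain ⟨k, hk⟩ := Option.isSome_iff_exists.mp
    ((PySem.List.index?_isSome_iff xs.reverse m).mpr (by simpa using hm))
  have hklt : k < xs.length := by
    obtain ⟨hlt, -, -⟩ := PySem.List.getElem_of_index?_eq_some hk
    simpa using hlt
  rw [hrev, hk]
  simp only [Option.map_some, Option.getD_some, List.length_append, List.length_singleton]
  omega

theorem lastIdx_le (xs : List String) (m : String) : lastIdx xs m ≤ xs.length :=
  le_trans (Nat.sub_le _ _) (le_trans (Nat.sub_le _ _) le_rfl)

-- A's marker loop never sets its flag, so appending one element just offers one more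
-- chance to overwrite n with the last index.
theorem loopMarkerA_append (xs : List String) (a m : String) (i : Nat) (n : Option Nat) :
    loopMarkerA (xs ++ [a]) m i n false =
      if a == m then some (i + xs.length) else loopMarkerA xs m i n false := by
  induction xs generalizing i n with
  | nil => simp [loopMarkerA]
  | cons x xs ih =>
      simp only [List.cons_append, loopMarkerA]
      by_cases hx : x == m <;> simp [hx, ih, List.length_cons] <;>
        rw [Nat.add_comm xs.length 1, ← Nat.add_assoc]

-- the marker loop computes exactly the last-occurrence index, guarded by membership
theorem loopMarkerA_eq (lines : List String) (m : String) :
    loopMarkerA lines m 0 none false =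
      if lines.contains m then some (lastIdx lines m) else none := by
  induction lines using List.reverseRecOn with
  | nil => simp [loopMarkerA]
  | append_singleton xs a ih =>
      rw [loopMarkerA_append, ih]
      by_cases ha : a == m
      · have ham : a = m := by simpa using ha
        subst ham
        simp [lastIdx_append_self]
      · have hne : a ≠ m := by simpa using ha
        by_cases hm : m ∈ xs
        · simp [ha, hm, lastIdx_append_ne xs a m hne hm]
        · simp [ha, hm, Ne.symm hne]

-- one past the first non-empty line, as a single scan
def firstNonemptyB : List String → Nat → Option Nat
  | [], _ => none
  | line :: rest, j => if line ≠ "" then some (j+1) else firstNonemptyB rest (j+1)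

-- A's paragraph loop and the scan agree once defaulted to the end of the list
theorem loopParaA_eq (xs : List String) (i : Nat) :
    (loopParaA xs i none false).getD (i + xs.length) =
      (firstNonemptyB xs i).getD (i + xs.length) := by
  induction xs generalizing i with
  | nil => simp [loopParaA, firstNonemptyB]
  | cons x rest ih =>
      by_cases hx : x = ""
      · subst hx
        simpa [loopParaA, firstNonemptyB, Nat.add_comm, Nat.add_assoc, Nat.add_left_comm]
          using ih (i+1)
      · cases rest with
        | nil => simp [loopParaA, firstNonemptyB, hx]
        | cons y ys => simp [loopParaA, firstNonemptyB, hx]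

theorem firstNonemptyB_le (xs : List String) (i v : Nat)
    (h : firstNonemptyB xs i = some v) : v ≤ i + xs.length := by
  induction xs generalizing i with
  | nil => simp [firstNonemptyB] at h
  | cons x rest ih =>
      by_cases hx : x = ""
      · have h' : firstNonemptyB rest (i+1) = some v := by
          simpa [firstNonemptyB, hx] using h
        have := ih (i+1) h'
        simp only [List.length_cons]
        omega
      · have hv : v = i + 1 := by
          have := h
          simp [firstNonemptyB, hx] at this
          omega
        simp only [List.length_cons]
        omega

theorem firstNonemptyB_append (xs : List String) (a : String) (i : Nat) :
    firstNonemptyB (xs ++ [a]) i =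
      (firstNonemptyB xs i).orElse
        (fun _ => if a ≠ "" then some (i + xs.length + 1) else none) := by
  induction xs generalizing i with
  | nil => simp [firstNonemptyB]
  | cons x rest ih =>
      by_cases hx : x = ""
      · subst hx
        simpa [firstNonemptyB, Nat.add_comm, Nat.add_assoc, Nat.add_left_comm] using ih (i+1)
      · simp [firstNonemptyB, hx]

-- characterization of B's single backward pass: first marker from the right wins,
-- with image priority; rank only ever increases.
theorem loopB_char (xs : List String) (r0 c0 : Int) (hr : 0 ≤ r0) :
    loopB (PySem.List.enumerate xs).reverse (r0, c0) =
      (if 2 ≤ r0 then (r0, c0)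
       else if "<!-- image -->" ∈ xs then (2, (lastIdx xs "<!-- image -->" : Int))
       else if 1 ≤ r0 then (r0, c0)
       else if "<!-- break -->" ∈ xs then (1, (lastIdx xs "<!-- break -->" : Int))
       else (r0, ((firstNonemptyB xs 0).map (fun v => (v : Int))).getD c0)) := by
  induction xs using List.reverseRecOn generalizing r0 c0 with
  | nil => simp [PySem.List.enumerate_nil, loopB, firstNonemptyB]
  | append_singleton xs a ih =>
      have henum : (PySem.List.enumerate (xs ++ [a])).reverse
          = ((xs.length : Int), a) :: (PySem.List.enumerate xs).reverse := by
        rw [PySem.List.enumerate_append]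
        simp [PySem.List.enumerate_cons, PySem.List.enumerate_nil]
      rw [henum]
      simp only [loopB]
      by_cases hc1 : a = "<!-- image -->" ∧ r0 < 2
      · -- a is the image marker and rank can still rise: insert here, rank 2
        rw [if_pos hc1, ih 2 (xs.length : Int) (by norm_num)]
        obtain ⟨ha, hlt⟩ := hc1
        subst ha
        simp [show ¬ (2:Int) ≤ r0 by omega, lastIdx_append_self]
      · rw [if_neg hc1]
        by_cases hc2 : a = "<!-- break -->" ∧ r0 = 0
        · -- a is the break marker and rank is 0
          rw [if_pos hc2, ih 1 (xs.length : Int) (by norm_num)]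
          obtain ⟨ha, h0⟩ := hc2
          subst ha h0
          by_cases him : "<!-- image -->" ∈ xs
          · simp [him, lastIdx_append_ne xs "<!-- break -->" "<!-- image -->" (by decide) him]
          · simp [him, lastIdx_append_self,
              show ("<!-- image -->" : String) ≠ "<!-- break -->" by decide]
        · rw [if_neg hc2]
          by_cases hc3 : a ≠ "" ∧ r0 = 0
          · -- a is a plain non-empty line and rank is 0: paragraph candidate
            obtain ⟨hne, h0⟩ := hc3
            subst h0
            have haI : a ≠ "<!-- image -->" := fun h => hc1 ⟨h, by norm_num⟩
            have haB : a ≠ "<!-- break -->" := fun h => hc2 ⟨h, rfl⟩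
            rw [if_pos ⟨hne, rfl⟩, ih 0 ((xs.length : Int) + 1) le_rfl]
            by_cases him : "<!-- image -->" ∈ xs
            · simp [him, lastIdx_append_ne xs _ _ haI him, Ne.symm haI]
            · by_cases hbr : "<!-- break -->" ∈ xs
              · simp [him, hbr, lastIdx_append_ne xs _ _ haB hbr, Ne.symm haI, Ne.symm haB]
              · rw [firstNonemptyB_append]
                cases hfo : firstNonemptyB xs 0 with
                | none =>
                    simp [him, hbr, Ne.symm haI, Ne.symm haB, hne, Option.orElse]
                | some v =>
                    simp [him, hbr, Ne.symm haI, Ne.symm haB, Option.orElse]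
          · -- nothing fires: the state passes through unchanged
            rw [if_neg hc3, ih r0 c0 hr]
            by_cases h2le : (2:Int) ≤ r0
            · simp [h2le]
            · have haI : a ≠ "<!-- image -->" := fun h => hc1 ⟨h, by omega⟩
              by_cases h1le : (1:Int) ≤ r0
              · by_cases him : "<!-- image -->" ∈ xs
                · simp [h2le, him, lastIdx_append_ne xs _ _ haI him, Ne.symm haI]
                · simp [h2le, h1le, him, Ne.symm haI]
              · have h0 : r0 = 0 := by omega
                subst h0
                have haB : a ≠ "<!-- break -->" := fun h => hc2 ⟨h, rfl⟩
                have hae : a = "" := by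
                  by_contra hne
                  exact hc3 ⟨hne, rfl⟩
                subst hae
                rw [firstNonemptyB_append]
                by_cases him : "<!-- image -->" ∈ xs
                · simp [him, lastIdx_append_ne xs _ _ haI him, Ne.symm haI]
                · by_cases hbr : "<!-- break -->" ∈ xs
                  · simp [him, hbr, lastIdx_append_ne xs _ _ haB hbr, Ne.symm haI, Ne.symm haB]
                  · cases hfo : firstNonemptyB xs 0 with
                    | none => simp [him, hbr, Ne.symm haI, Ne.symm haB, Option.orElse]
                    | some v => simp [him, hbr, Ne.symm haI, Ne.symm haB, Option.orElse]

-- two Python inserts at the same position n ≤ len = one splice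
theorem double_insert_eq (lines : List String) (fig : String) (n : Nat)
    (hn : n ≤ lines.length) :
    PySem.List.insert (PySem.List.insert lines (n : Int) fig) (n : Int) ""
      = lines.take n ++ "" :: fig :: lines.drop n := by
  rw [PySem.List.insert_natCast lines n fig hn]
  rw [PySem.List.insert_natCast _ n "" (by simp; omega)]
  have hlen : (lines.take n).length = n := by simp [List.length_take]; omega
  rw [List.take_append_of_le_length (by omega)]
  rw [List.drop_append_of_le_length (by omega)]
  simp [List.take_take, List.drop_eq_nil_of_le (by omega : (lines.take n).length ≤ n)]

-- ===== VERDICT (by name: the statement is the Claim_ definition above) =====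
theorem insert_figure_spec : Claim_equal_insert_figure := by
  intro lines image caption _
  unfold Spec_insert_figure insert_figure insert_figure_alt
  rw [loopB_char lines 0 (lines.length : Int) le_rfl]
  simp only [loopMarkerA_eq]
  by_cases hm1 : "<!-- image -->" ∈ lines
  · simp [hm1, double_insert_eq _ _ _ (lastIdx_le lines _)]
  · by_cases hm2 : "<!-- break -->" ∈ lines
    · simp [hm1, hm2, double_insert_eq _ _ _ (lastIdx_le lines _)]
    · have hpara := loopParaA_eq lines 0
      simp only [Nat.zero_add] at hpara
      have hle : (firstNonemptyB lines 0).getD lines.length ≤ lines.length := by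
        cases h : firstNonemptyB lines 0 with
        | none => simp
        | some v => simpa using firstNonemptyB_le lines 0 v h
      cases h : firstNonemptyB lines 0 with
      | none =>
          rw [h] at hpara
          simp [hm1, hm2, hpara, double_insert_eq lines _ lines.length le_rfl]
      | some v =>
          rw [h] at hpara hle
          simp only [Option.getD_some] at hpara hle
          simp [hm1, hm2, hpara, double_insert_eq lines _ v hle]
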